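-- pv_equiv track=rewrite | github.com/DaniaCerpa/P-consolidacion-M3 | clasificacion.py | clasificar_en_categ
-- ===== SOURCE A (Python) =====
-- def clasificar_en_categ(celebridades):
--
--     categorias= {
--     "magos" : [],
--     "cientificos" : [],
--     "otros" : []
--     }
--
--     for nombre in celebridades:
--         if nombre in ["Harry Houdini", "David Blaine", "Teller"]:
--             categorias["magos"].append(nombre)
--         elif nombre in ["Newton", "Hawking", "Einstein"]:
--             categorias["cientificos"].append(nombre)
--         else:
--             categorias["otros"].append(nombre)
--     return categorias
-- ===== SOURCE B (Python) =====
-- MAGOS = {"Harry Houdini", "David Blaine", "Teller"}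
-- CIENTIFICOS = {"Newton", "Hawking", "Einstein"}
--
-- def clasificar_en_categ(celebridades):
--     # Three independent passes, one per category, instead of one interleaved loop.
--     magos = [n for n in celebridades if n in MAGOS]
--     cientificos = [n for n in celebridades if n in CIENTIFICOS]
--     otros = [n for n in celebridades if n not in MAGOS and n not in CIENTIFICOS]
--     return {"magos": magos, "cientificos": cientificos, "otros": otros}
-- ===== Notes on version B (the rewrite author's own statement) =====
-- stated objective: simpler
-- what changed: Replaces the single loop that interleaves appends into a mutable dict with three independent filter passes (one comprehension per category) assembled into the result dict at the end.
import Mathlib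
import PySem

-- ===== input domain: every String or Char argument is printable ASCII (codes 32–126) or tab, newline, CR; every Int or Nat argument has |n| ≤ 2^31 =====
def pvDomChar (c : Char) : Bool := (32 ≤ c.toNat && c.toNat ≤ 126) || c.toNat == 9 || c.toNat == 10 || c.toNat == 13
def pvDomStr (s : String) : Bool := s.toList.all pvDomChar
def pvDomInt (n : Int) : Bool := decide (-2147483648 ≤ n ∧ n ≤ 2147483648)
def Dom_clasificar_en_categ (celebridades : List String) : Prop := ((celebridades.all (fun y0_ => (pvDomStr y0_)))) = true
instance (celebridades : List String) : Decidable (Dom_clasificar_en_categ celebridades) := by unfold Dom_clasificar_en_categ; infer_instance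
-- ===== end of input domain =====

-- B replaces A's single interleaved dict-append loop by three independent filter passes; objective: simpler.


-- ===== PORT A =====
-- literal port: a dict with the three empty category lists, then one loop appending
-- each name to its category via d[key].append(name) (= Dict.modify with ++ [name]).
def clasificar_en_categ (celebridades : List String) : List (String × List String) :=
  let categorias : PySem.Dict String (List String) :=
    PySem.Dict.mk [("magos", []), ("cientificos", []), ("otros", [])]
  let final := celebridades.foldl (fun d nombre =>
    if nombre ∈ ["Harry Houdini", "David Blaine", "Teller"] then
      d.modify "magos" [] (· ++ [nombre])
    else if nombre ∈ ["Newton", "Hawking", "Einstein"] then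
      d.modify "cientificos" [] (· ++ [nombre])
    else
      d.modify "otros" [] (· ++ [nombre])) categorias
  final.items

-- ===== PORT B =====
def pvMagos : List String := ["Harry Houdini", "David Blaine", "Teller"]
def pvCientificos : List String := ["Newton", "Hawking", "Einstein"]

def clasificar_en_categ_alt (celebridades : List String) : List (String × List String) :=
  let magos := celebridades.filter (fun n => n ∈ pvMagos)
  let cientificos := celebridades.filter (fun n => n ∈ pvCientificos)
  let otros := celebridades.filter (fun n => n ∉ pvMagos ∧ n ∉ pvCientificos)
  [("magos", magos), ("cientificos", cientificos), ("otros", otros)]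

-- ===== PRECONDITION & SPEC =====
def Spec_clasificar_en_categ (celebridades : List String) (out : List (String × List String)) : Prop := out = clasificar_en_categ_alt celebridades
instance (celebridades : List String) (out : List (String × List String)) : Decidable (Spec_clasificar_en_categ celebridades out) := by unfold Spec_clasificar_en_categ; infer_instance

-- ===== CLAIM (what is proved, stated in full; the proofs are below) =====
def Claim_equal_clasificar_en_categ : Prop := ∀ (celebridades : List String), Dom_clasificar_en_categ celebridades → Spec_clasificar_en_categ celebridades (clasificar_en_categ celebridades)

-- ===== LEMMAS AND PROOFS =====

-- loop invariant: folding A's step over any dict of the fixed three-key shape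
-- appends exactly B's three filters to the respective accumulated lists.
theorem clasificar_fold_inv (l : List String) (m c o : List String) :
    (l.foldl (fun d nombre =>
      if nombre ∈ ["Harry Houdini", "David Blaine", "Teller"] then
        d.modify "magos" [] (· ++ [nombre])
      else if nombre ∈ ["Newton", "Hawking", "Einstein"] then
        d.modify "cientificos" [] (· ++ [nombre])
      else
        d.modify "otros" [] (· ++ [nombre]))
      (PySem.Dict.mk [("magos", m), ("cientificos", c), ("otros", o)])) =
    PySem.Dict.mk [("magos", m ++ l.filter (fun n => n ∈ pvMagos)),
                   ("cientificos", c ++ l.filter (fun n => n ∈ pvCientificos)),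
                   ("otros", o ++ l.filter (fun n => n ∉ pvMagos ∧ n ∉ pvCientificos))] := by
  induction l generalizing m c o with
  | nil => simp
  | cons x xs ih =>
    by_cases hm : x ∈ pvMagos
    · have hstep : (if x ∈ ["Harry Houdini", "David Blaine", "Teller"] then
          (PySem.Dict.mk [("magos", m), ("cientificos", c), ("otros", o)]).modify "magos" [] (· ++ [x])
        else if x ∈ ["Newton", "Hawking", "Einstein"] then
          (PySem.Dict.mk [("magos", m), ("cientificos", c), ("otros", o)]).modify "cientificos" [] (· ++ [x])
        else
          (PySem.Dict.mk [("magos", m), ("cientificos", c), ("otros", o)]).modify "otros" [] (· ++ [x])) =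
          PySem.Dict.mk [("magos", m ++ [x]), ("cientificos", c), ("otros", o)] := by
        simp only [pvMagos] at hm
        simp [hm, PySem.Dict.modify, PySem.Dict.insert, PySem.Dict.getD, PySem.Dict.get?,
              PySem.Dict.contains]
      have hnotc : x ∉ pvCientificos := by
        simp only [pvMagos, List.mem_cons, List.not_mem_nil, or_false] at hm
        simp only [pvCientificos, List.mem_cons, List.not_mem_nil, or_false]
        rcases hm with h | h | h <;> simp [h]
      simp only [List.foldl_cons, hstep, ih, List.filter_cons]
      simp [hm, hnotc]
    · by_cases hc : x ∈ pvCientificos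
      · have hstep : (if x ∈ ["Harry Houdini", "David Blaine", "Teller"] then
            (PySem.Dict.mk [("magos", m), ("cientificos", c), ("otros", o)]).modify "magos" [] (· ++ [x])
          else if x ∈ ["Newton", "Hawking", "Einstein"] then
            (PySem.Dict.mk [("magos", m), ("cientificos", c), ("otros", o)]).modify "cientificos" [] (· ++ [x])
          else
            (PySem.Dict.mk [("magos", m), ("cientificos", c), ("otros", o)]).modify "otros" [] (· ++ [x])) =
            PySem.Dict.mk [("magos", m), ("cientificos", c ++ [x]), ("otros", o)] := by
          simp only [pvMagos] at hm
          simp only [pvCientificos] at hc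
          simp [hm, hc, PySem.Dict.modify, PySem.Dict.insert, PySem.Dict.getD, PySem.Dict.get?,
                PySem.Dict.contains]
        simp only [List.foldl_cons, hstep, ih, List.filter_cons]
        simp [hm, hc]
      · have hstep : (if x ∈ ["Harry Houdini", "David Blaine", "Teller"] then
            (PySem.Dict.mk [("magos", m), ("cientificos", c), ("otros", o)]).modify "magos" [] (· ++ [x])
          else if x ∈ ["Newton", "Hawking", "Einstein"] then
            (PySem.Dict.mk [("magos", m), ("cientificos", c), ("otros", o)]).modify "cientificos" [] (· ++ [x])
          else
            (PySem.Dict.mk [("magos", m), ("cientificos", c), ("otros", o)]).modify "otros" [] (· ++ [x])) =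
            PySem.Dict.mk [("magos", m), ("cientificos", c), ("otros", o ++ [x])] := by
          simp only [pvMagos] at hm
          simp only [pvCientificos] at hc
          simp [hm, hc, PySem.Dict.modify, PySem.Dict.insert, PySem.Dict.getD, PySem.Dict.get?,
                PySem.Dict.contains]
        simp only [List.foldl_cons, hstep, ih, List.filter_cons]
        simp [hm, hc]

-- ===== VERDICT (by name: the statement is the Claim_ definition above) =====
theorem clasificar_en_categ_spec : Claim_equal_clasificar_en_categ := by
  intro celebridades _
  unfold Spec_clasificar_en_categ clasificar_en_categ clasificar_en_categ_alt
  simp only [clasificar_fold_inv]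
  rfl
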